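-- pv_equiv track=rewrite | github.com/datashaman/booty | src/booty/architect/validation.py | compute_risk_from_touch_paths
-- ===== SOURCE A (Python) =====
-- from typing import Literal
--
-- HIGH_RISK_PATTERNS = (
--     ".github/workflows/",
--     "infra/",
--     "migrations",
--     "package-lock.json",
--     "yarn.lock",
--     "uv.lock",
--     "poetry.lock",
--     "Cargo.lock",
-- )
--
-- MEDIUM_RISK_FILES = (
--     "pyproject.toml",
--     "package.json",
--     "requirements.txt",
--     "Cargo.toml",
-- )
--
-- def compute_risk_from_touch_paths(
--     touch_paths: list[str],
-- ) -> Literal["LOW", "MEDIUM", "HIGH"]: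
--     """Compute risk from touch_paths (ARCH-11).
--
--     HIGH: workflows, infra, migrations, lockfiles
--     MEDIUM: pyproject.toml, package.json, requirements.txt, Cargo.toml
--     LOW: else
--     """
--     risk = "LOW"
--     for path in touch_paths:
--         path_lower = path.lower()
--         # HIGH
--         for pat in HIGH_RISK_PATTERNS:
--             if pat in path_lower or path_lower.endswith(pat):
--                 return "HIGH"
--         # MEDIUM
--         path_parts = path_lower.replace("\\", "/").split("/")
--         if any(p in MEDIUM_RISK_FILES for p in path_parts):
--             risk = "MEDIUM"
--     return risk  # type: ignore[return-value]
-- ===== SOURCE B (Python) =====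
-- HIGH_RISK_PATTERNS = (
--     ".github/workflows/",
--     "infra/",
--     "migrations",
--     "package-lock.json",
--     "yarn.lock",
--     "uv.lock",
--     "poetry.lock",
--     "Cargo.lock",
-- )
--
-- MEDIUM_RISK_FILES = (
--     "pyproject.toml",
--     "package.json",
--     "requirements.txt",
--     "Cargo.toml",
-- )
--
--
-- def compute_risk_from_touch_paths(touch_paths):
--     # Staged whole-list passes: first decide HIGH globally, then pool every
--     # path segment of every path into one set and probe MEDIUM names in it.
--     lowered = [p.lower() for p in touch_paths]
--     if any(pat in pl or pl.endswith(pat) for pl in lowered for pat in HIGH_RISK_PATTERNS):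
--         return "HIGH"
--     segments = set()
--     for pl in lowered:
--         segments.update(pl.replace("\\", "/").split("/"))
--     if any(m in segments for m in MEDIUM_RISK_FILES):
--         return "MEDIUM"
--     return "LOW"
-- ===== Notes on version B (the rewrite author's own statement) =====
-- stated objective: alternative
-- what changed: Replaces A's single interleaved per-path loop with a risk accumulator and early return by two staged whole-list passes: one global scan for any HIGH pattern, then one pooled set of all path segments across all paths probed with the MEDIUM filenames.
import Mathlib
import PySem

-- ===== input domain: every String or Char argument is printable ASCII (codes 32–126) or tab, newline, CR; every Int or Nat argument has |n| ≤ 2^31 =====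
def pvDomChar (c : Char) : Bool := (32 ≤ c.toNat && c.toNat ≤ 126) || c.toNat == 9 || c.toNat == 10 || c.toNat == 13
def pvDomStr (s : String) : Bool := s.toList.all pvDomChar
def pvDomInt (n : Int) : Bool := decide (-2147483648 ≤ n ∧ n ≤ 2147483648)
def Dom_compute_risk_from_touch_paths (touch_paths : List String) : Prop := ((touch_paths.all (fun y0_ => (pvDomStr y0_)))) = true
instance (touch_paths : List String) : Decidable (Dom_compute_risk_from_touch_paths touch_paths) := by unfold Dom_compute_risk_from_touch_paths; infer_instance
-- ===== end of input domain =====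

-- B replaces A's interleaved per-path loop with an accumulator and early return by two staged
-- whole-list passes: a global HIGH scan, then a pooled set of all path segments probed with
-- the MEDIUM filenames (objective: alternative; same cost).

-- ===== PORT A =====
def HIGH_RISK_PATTERNS : List String :=
  [".github/workflows/", "infra/", "migrations", "package-lock.json",
   "yarn.lock", "uv.lock", "poetry.lock", "Cargo.lock"]

def MEDIUM_RISK_FILES : List String :=
  ["pyproject.toml", "package.json", "requirements.txt", "Cargo.toml"]

-- A's loop: early return "HIGH"; otherwise thread the `risk` accumulator through.
def riskLoopA : List String → String → String
  | [], risk => risk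
  | path :: rest, risk =>
    let path_lower := PySem.Str.lower path
    -- inner `for pat in HIGH_RISK_PATTERNS: if …: return "HIGH"` = any with early return
    if HIGH_RISK_PATTERNS.any (fun pat =>
        PySem.Str.isIn pat path_lower || PySem.Str.endswith path_lower pat) then
      "HIGH"
    else
      let path_parts := (PySem.Str.split? (PySem.Str.replace path_lower "\\" "/") "/").getD []  -- sep "/" ≠ "": split? is always some
      if path_parts.any (fun p => MEDIUM_RISK_FILES.any (fun m => m == p)) then
        riskLoopA rest "MEDIUM"
      else
        riskLoopA rest risk

def compute_risk_from_touch_paths (touch_paths : List String) : String :=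
  riskLoopA touch_paths "LOW"

-- ===== PORT B =====
-- segments of one lowered path (pl.replace("\\","/").split("/")); sep "/" ≠ "": split? always some
def segsOf (pl : String) : List String :=
  (PySem.Str.split? (PySem.Str.replace pl "\\" "/") "/").getD []

def compute_risk_from_touch_paths_alt (touch_paths : List String) : String :=
  let lowered := touch_paths.map PySem.Str.lower
  if lowered.any (fun pl => HIGH_RISK_PATTERNS.any (fun pat =>
      PySem.Str.isIn pat pl || PySem.Str.endswith pl pat)) then "HIGH"
  else
    -- segments = set(); for pl in lowered: segments.update(...)
    let segments := lowered.foldl (fun s pl => PySem.Set.update s (segsOf pl)) PySem.Set.empty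
    if MEDIUM_RISK_FILES.any (fun m => PySem.Set.contains segments m) then "MEDIUM" else "LOW"

-- ===== PRECONDITION & SPEC =====
def Spec_compute_risk_from_touch_paths (touch_paths : List String) (out : String) : Prop := out = compute_risk_from_touch_paths_alt touch_paths
instance (touch_paths : List String) (out : String) : Decidable (Spec_compute_risk_from_touch_paths touch_paths out) := by unfold Spec_compute_risk_from_touch_paths; infer_instance

-- ===== CLAIM =====
def Claim_equal_compute_risk_from_touch_paths : Prop := ∀ (touch_paths : List String), Dom_compute_risk_from_touch_paths touch_paths → Spec_compute_risk_from_touch_paths touch_paths (compute_risk_from_touch_paths touch_paths)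

-- ===== LEMMAS AND PROOFS =====

def highP (pl : String) : Bool :=
  HIGH_RISK_PATTERNS.any (fun pat => PySem.Str.isIn pat pl || PySem.Str.endswith pl pat)

def medP (pl : String) : Bool :=
  (segsOf pl).any (fun p => MEDIUM_RISK_FILES.any (fun m => m == p))

lemma riskLoopA_char : ∀ (xs : List String) (r : String),
    riskLoopA xs r =
      if xs.any (fun p => highP (PySem.Str.lower p)) then "HIGH"
      else if xs.any (fun p => medP (PySem.Str.lower p)) then "MEDIUM" else r
  | [], r => by simp [riskLoopA]
  | p :: xs, r => by
    rw [riskLoopA]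
    have fold1 : (HIGH_RISK_PATTERNS.any fun pat =>
        PySem.Str.isIn pat (PySem.Str.lower p) || PySem.Str.endswith (PySem.Str.lower p) pat)
        = highP (PySem.Str.lower p) := rfl
    have fold2 : (((PySem.Str.split? (PySem.Str.replace (PySem.Str.lower p) "\\" "/") "/").getD []).any
        fun q => MEDIUM_RISK_FILES.any fun m => m == q) = medP (PySem.Str.lower p) := rfl
    simp only [fold1, fold2]
    by_cases h1 : highP (PySem.Str.lower p)
    · rw [if_pos h1]
      simp [List.any_cons, h1]
    · rw [if_neg h1]
      have h1f : highP (PySem.Str.lower p) = false := by simpa using h1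
      by_cases h2 : medP (PySem.Str.lower p)
      · rw [if_pos h2, riskLoopA_char xs "MEDIUM"]
        simp only [List.any_cons, h1f, h2, Bool.false_or, Bool.true_or, if_true]
        split_ifs <;> rfl
      · have h2f : medP (PySem.Str.lower p) = false := by simpa using h2
        rw [if_neg h2, riskLoopA_char xs r]
        simp only [List.any_cons, h1f, h2f, Bool.false_or]

lemma mem_foldl_update {y : String} (ls : List String) : ∀ (s : PySem.Set String),
    (y ∈ ls.foldl (fun s pl => PySem.Set.update s (segsOf pl)) s) ↔
      y ∈ s ∨ ∃ pl ∈ ls, y ∈ segsOf pl := by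
  induction ls with
  | nil => intro s; simp
  | cons pl ls ih =>
    intro s
    rw [List.foldl_cons, ih]
    simp only [PySem.Set.mem_update, List.mem_cons]
    constructor
    · rintro ((h | h) | ⟨q, hq, hs⟩)
      · exact Or.inl h
      · exact Or.inr ⟨pl, Or.inl rfl, h⟩
      · exact Or.inr ⟨q, Or.inr hq, hs⟩
    · rintro (h | ⟨q, (rfl | hq), hs⟩)
      · exact Or.inl (Or.inl h)
      · exact Or.inl (Or.inr hs)
      · exact Or.inr ⟨q, hq, hs⟩

lemma med_cond_eq (xs : List String) :
    (MEDIUM_RISK_FILES.any (fun m => PySem.Set.contains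
        ((xs.map PySem.Str.lower).foldl (fun s pl => PySem.Set.update s (segsOf pl)) PySem.Set.empty) m))
      = xs.any (fun p => medP (PySem.Str.lower p)) := by
  cases h : (xs.any (fun p => medP (PySem.Str.lower p)))
  case true =>
    rw [List.any_eq_true] at h
    obtain ⟨p, hp, hmed⟩ := h
    rw [medP, List.any_eq_true] at hmed
    obtain ⟨q, hq, hmm⟩ := hmed
    rw [List.any_eq_true] at hmm
    obtain ⟨m, hm, hmq⟩ := hmm
    rw [List.any_eq_true]
    refine ⟨m, hm, ?_⟩
    rw [PySem.Set.contains_iff, mem_foldl_update]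
    exact Or.inr ⟨PySem.Str.lower p, List.mem_map_of_mem hp, by rw [beq_iff_eq] at hmq; rw [hmq]; exact hq⟩
  case false =>
    rw [Bool.eq_false_iff]
    intro hc
    rw [List.any_eq_true] at hc
    obtain ⟨m, hm, hc⟩ := hc
    rw [PySem.Set.contains_iff, mem_foldl_update] at hc
    rcases hc with hc | ⟨pl, hpl, hseg⟩
    · simp [PySem.Set.empty] at hc
    · rw [List.mem_map] at hpl
      obtain ⟨p, hp, rfl⟩ := hpl
      have hx : xs.any (fun p => medP (PySem.Str.lower p)) = true := by
        rw [List.any_eq_true]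
        exact ⟨p, hp, by
          rw [medP, List.any_eq_true]
          exact ⟨m, hseg, by rw [List.any_eq_true]; exact ⟨m, hm, by simp⟩⟩⟩
      rw [h] at hx; exact Bool.false_ne_true hx

-- ===== VERDICT =====
theorem compute_risk_from_touch_paths_spec : Claim_equal_compute_risk_from_touch_paths := by
  intro xs _
  show compute_risk_from_touch_paths xs = compute_risk_from_touch_paths_alt xs
  rw [compute_risk_from_touch_paths, riskLoopA_char, compute_risk_from_touch_paths_alt]
  simp only [List.any_map, Function.comp_def, med_cond_eq]
  rfl
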